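-- pv_equiv track=rewrite | github.com/roman-gulida/bioinformatics | lab9/9_1.py | calculate_fragments
-- ===== SOURCE A (Python) =====
-- def calculate_fragments(sequence_length, cleavage_positions):
--     if not cleavage_positions:
--         return [sequence_length]
--
--     sorted_positions = sorted(cleavage_positions)
--     fragments = []
--
--     fragments.append(sorted_positions[0])
--
--     for i in range(1, len(sorted_positions)):
--         fragments.append(sorted_positions[i] - sorted_positions[i-1])
--
--     fragments.append(sequence_length - sorted_positions[-1])
--
--     return fragments
-- ===== SOURCE B (Python) =====
-- def calculate_fragments(sequence_length, cleavage_positions):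
--     # Selection approach: repeatedly extract the minimum remaining cleavage
--     # position and emit its distance from the previous cut; no sorting pass.
--     remaining = list(cleavage_positions)
--     fragments = []
--     prev = 0
--     while remaining:
--         m = min(remaining)
--         fragments.append(m - prev)
--         remaining.remove(m)
--         prev = m
--     fragments.append(sequence_length - prev)
--     return fragments
-- ===== Notes on version B (the rewrite author's own statement) =====
-- stated objective: alternative
-- what changed: B never sorts: it keeps a shrinking multiset of remaining positions and a running previous cut, repeatedly extracting the minimum and emitting its distance from the previous cut (selection instead of sort-then-diff), which also removes the empty-list guard and both endpoint special cases.
import Mathlib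
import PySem

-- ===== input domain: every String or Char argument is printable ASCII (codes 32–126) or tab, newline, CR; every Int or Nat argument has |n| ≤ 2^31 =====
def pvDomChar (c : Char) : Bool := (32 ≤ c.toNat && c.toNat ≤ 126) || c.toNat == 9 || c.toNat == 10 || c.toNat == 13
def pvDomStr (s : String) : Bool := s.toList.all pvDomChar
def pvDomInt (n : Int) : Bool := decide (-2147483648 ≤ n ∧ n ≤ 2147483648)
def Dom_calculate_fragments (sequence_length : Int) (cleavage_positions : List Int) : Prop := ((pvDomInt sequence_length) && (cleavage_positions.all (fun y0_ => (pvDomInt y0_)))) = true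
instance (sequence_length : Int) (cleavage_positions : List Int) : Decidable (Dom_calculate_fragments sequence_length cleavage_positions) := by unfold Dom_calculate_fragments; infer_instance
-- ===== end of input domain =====

-- B replaces A's sort-then-diff by selection: repeatedly extract the minimum remaining
-- position and emit its distance from the previous cut (objective: alternative algorithm).

-- ===== PORT A =====
def calculate_fragments (sequence_length : Int) (cleavage_positions : List Int) : List Int :=
  if cleavage_positions = [] then [sequence_length]
  else
    let sorted_positions := PySem.List.sorted cleavage_positions (fun x => x) false
    let fragments : List Int := []
    let fragments := fragments ++ [PySem.List.pyGetD sorted_positions 0 0]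
    let fragments := (PySem.List.pyRange 1 sorted_positions.length 1).foldl
      (fun acc i => acc ++ [PySem.List.pyGetD sorted_positions i 0 -
                            PySem.List.pyGetD sorted_positions (i - 1) 0]) fragments
    fragments ++ [sequence_length - PySem.List.pyGetD sorted_positions (-1) 0]

-- ===== PORT B =====
-- the while loop of Source B as structural recursion on the state (remaining, prev, fragments);
-- min(remaining) → PySem.List.min?, remaining.remove(m) → PySem.List.remove? (never none here)
def calcLoop (sequence_length : Int) (remaining : List Int) (prev : Int) (fragments : List Int) : List Int :=
  match h : PySem.List.min? remaining (fun x => x) with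
  | none => fragments ++ [sequence_length - prev]
  | some m =>
      calcLoop sequence_length ((PySem.List.remove? remaining m).getD []) m (fragments ++ [m - prev])
termination_by remaining.length
decreasing_by
  have hm : m ∈ remaining := PySem.List.min?_mem h
  have he : PySem.List.remove? remaining m = some (remaining.erase m) :=
    PySem.List.remove?_eq_some_erase remaining m hm
  rw [he, Option.getD_some, List.length_erase_of_mem hm]
  have : remaining.length ≠ 0 := by
    intro h0; exact absurd (List.eq_nil_of_length_eq_zero h0 ▸ hm) (List.not_mem_nil)
  omega

def calculate_fragments_alt (sequence_length : Int) (cleavage_positions : List Int) : List Int :=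
  calcLoop sequence_length cleavage_positions 0 []

-- ===== PRECONDITION & SPEC =====
def Spec_calculate_fragments (sequence_length : Int) (cleavage_positions : List Int) (out : List Int) : Prop := out = calculate_fragments_alt sequence_length cleavage_positions
instance (sequence_length : Int) (cleavage_positions : List Int) (out : List Int) : Decidable (Spec_calculate_fragments sequence_length cleavage_positions out) := by unfold Spec_calculate_fragments; infer_instance

-- ===== CLAIM (what is proved, stated in full; the proofs are below) =====
def Claim_equal_calculate_fragments : Prop := ∀ (sequence_length : Int) (cleavage_positions : List Int), Dom_calculate_fragments sequence_length cleavage_positions → Spec_calculate_fragments sequence_length cleavage_positions (calculate_fragments sequence_length cleavage_positions)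

-- ===== LEMMAS AND PROOFS =====

-- reference form: successive differences over a (sorted) list from a previous cut
def diffs (prev : Int) (s : List Int) (L : Int) : List Int :=
  match s with
  | [] => [L - prev]
  | x :: t => (x - prev) :: diffs x t L

lemma diffs_zip : ∀ (prev : Int) (s : List Int) (L : Int),
    diffs prev s L = ((prev :: (s ++ [L])).zip (s ++ [L])).map (fun p => p.2 - p.1) := by
  intro prev s L
  induction s generalizing prev with
  | nil => simp [diffs]
  | cons x t ih => simp [diffs, ih x]

lemma mid_eq (x : Int) (t : List Int) :
    (PySem.List.pyRange 1 ((x :: t).length) 1).map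
      (fun i => PySem.List.pyGetD (x :: t) i 0 - PySem.List.pyGetD (x :: t) (i - 1) 0)
    = ((x :: t).zip t).map (fun p => p.2 - p.1) := by
  apply List.ext_getElem
  · simp [PySem.List.length_pyRange_one]
  · intro k h1 h2
    simp only [List.getElem_map, PySem.List.getElem_pyRange_one, List.getElem_zip]
    have hk : k < t.length := by
      simp [PySem.List.length_pyRange_one] at h1; omega
    have e1 : (1 : Int) + k = ((k + 1 : Nat) : Int) := by push_cast; ring
    have e2 : ((k + 1 : Nat) : Int) - 1 = ((k : Nat) : Int) := by push_cast; ring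
    rw [e1, e2, PySem.List.pyGetD_natCast, PySem.List.pyGetD_natCast]
    rw [List.getD_eq_getElem _ _ (by simpa using Nat.succ_lt_succ hk),
        List.getD_eq_getElem _ _ (by simp; omega)]
    simp

lemma zip_append_last (u : List Int) (y L : Int) :
    ((y :: u ++ [L]).zip (u ++ [L])).map (fun p => p.2 - p.1)
    = ((y :: u).zip u).map (fun p => p.2 - p.1) ++ [L - (y :: u).getLast (by simp)] := by
  induction u generalizing y with
  | nil => simp
  | cons z u' ih => simpa using ih z

-- A's nonempty branch equals diffs 0 (sorted) L
lemma a_core (s : List Int) (L : Int) (h : s ≠ []) :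
    (PySem.List.pyGetD s 0 0 ::
        (PySem.List.pyRange 1 (s.length : Int) 1).map
          (fun i => PySem.List.pyGetD s i 0 - PySem.List.pyGetD s (i - 1) 0))
      ++ [L - PySem.List.pyGetD s (-1) 0]
    = diffs 0 s L := by
  obtain ⟨x, t, rfl⟩ := List.exists_cons_of_ne_nil h
  rw [PySem.List.pyGetD_neg_one _ _ h, PySem.List.pyGetD_zero_cons, mid_eq, diffs_zip]
  have step : ((0 :: ((x :: t) ++ [L])).zip ((x :: t) ++ [L])).map (fun p => p.2 - p.1)
      = (x - 0) :: (((x :: t) ++ [L]).zip (t ++ [L])).map (fun p => p.2 - p.1) := by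
    simp
  rw [step, zip_append_last t x L]
  simp

-- head of sorted(l) is the (first) minimum, its tail is sorted of the erased list
lemma sorted_cons_of_min (l : List Int) (m : Int)
    (hmin : PySem.List.min? l (fun x => x) = some m) :
    PySem.List.sorted l (fun x => x) false = m :: PySem.List.sorted (l.erase m) (fun x => x) false := by
  have hm : m ∈ l := PySem.List.min?_mem hmin
  have hne : l ≠ [] := by intro h0; rw [h0] at hm; exact absurd hm (List.not_mem_nil)
  have hsne : PySem.List.sorted l (fun x => x) false ≠ [] := by
    rw [Ne, PySem.List.sorted_eq_nil_iff]; exact hne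
  obtain ⟨y, t, hs⟩ := List.exists_cons_of_ne_nil hsne
  have hperm : (y :: t).Perm l := hs ▸ PySem.List.sorted_perm l (fun x => x) false
  have hym : y = m := by
    have h1 : y ≤ m := PySem.List.key_head_sorted_le l (fun x => x) hs m hm
    have h2 : m ≤ y := PySem.List.min?_isMin hmin y (hperm.mem_iff.mp (by simp))
    omega
  subst hym
  have hpair : (y :: t).Pairwise (fun a b => a ≤ b) := by
    have := PySem.List.sorted_pairwise l (fun x => x)
    rwa [hs] at this
  have htperm : t.Perm (l.erase y) := (List.cons_perm_iff_perm_erase.mp hperm).2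
  have htail : PySem.List.sorted (l.erase y) (fun x => x) false = t :=
    PySem.List.sorted_id_eq_of_perm_of_pairwise (l.erase y) t htperm (List.Pairwise.of_cons hpair)
  rw [hs, htail]

lemma loop_eq_aux (L : Int) : ∀ (n : Nat) (l : List Int), l.length ≤ n → ∀ (prev : Int) (acc : List Int),
    calcLoop L l prev acc = acc ++ diffs prev (PySem.List.sorted l (fun x => x) false) L := by
  intro n
  induction n with
  | zero =>
    intro l hl prev acc
    have : l = [] := List.eq_nil_of_length_eq_zero (Nat.le_zero.mp hl)
    subst this
    rw [calcLoop]
    simp [PySem.List.sorted, diffs, PySem.List.min?]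
  | succ n ih =>
    intro l hl prev acc
    rw [calcLoop]
    cases h : PySem.List.min? l (fun x => x) with
    | none =>
      have : l = [] := (PySem.List.min?_eq_none_iff l (fun x => x)).mp h
      subst this
      dsimp only
      simp [PySem.List.sorted, diffs]
    | some m =>
      have hm : m ∈ l := PySem.List.min?_mem h
      dsimp only
      rw [PySem.List.remove?_eq_some_erase l m hm, Option.getD_some]
      have hlen : (l.erase m).length ≤ n := by
        have := List.length_erase_of_mem hm
        have hne : l.length ≠ 0 := by
          intro h0; exact absurd (List.eq_nil_of_length_eq_zero h0 ▸ hm) (List.not_mem_nil)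
        omega
      rw [ih _ hlen m (acc ++ [m - prev]), sorted_cons_of_min l m h]
      simp [diffs]

lemma loop_eq (L : Int) (l : List Int) (prev : Int) (acc : List Int) :
    calcLoop L l prev acc = acc ++ diffs prev (PySem.List.sorted l (fun x => x) false) L :=
  loop_eq_aux L l.length l (le_refl _) prev acc

-- ===== VERDICT (by name: the statement is the Claim_ definition above) =====
theorem calculate_fragments_spec : Claim_equal_calculate_fragments := by
  intro L ps _
  unfold Spec_calculate_fragments calculate_fragments calculate_fragments_alt
  rw [loop_eq]
  by_cases h : ps = []
  · subst h
    simp [PySem.List.sorted, diffs]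
  · simp only [if_neg h, List.nil_append]
    have hsne : PySem.List.sorted ps (fun x => x) false ≠ [] := by
      rw [Ne, PySem.List.sorted_eq_nil_iff]; exact h
    rw [PySem.List.foldl_append_singleton_eq_map]
    rw [← a_core _ L hsne]
    simp
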